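-- pv_equiv track=rewrite | github.com/egg-west/mople | dataset/hh_dataset.py | _split_dialogue
-- ===== SOURCE A (Python) =====
-- def _split_dialogue(text: str) -> list[tuple[str, str]]:
--     lines = text.split("\n\n")
--
--     dialogue: list[tuple[str, str]] = []
--
--     # go over messages and combine consecutive messages from the
--     # same speaker (OA v1 expects alternating roles)
--     role = None
--     messages = []
--     for line in lines:
--         if line.startswith("Human:"):
--             speaker = "Human"
--             message = line[7:]
--         elif line.startswith("Assistant:"):
--             speaker = "Assistant"
--             message = line[11:]
--         else:
--             continue
--         if role != speaker:
--             if role is not None: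
--                 dialogue.append((role, "\n".join(messages)))
--                 messages = []
--             role = speaker
--         messages.append(message.strip())
--
--     if role is not None and len(messages) > 0:
--         dialogue.append((role, "\n".join(messages)))
--
--     return dialogue
-- ===== SOURCE B (Python) =====
-- def _split_dialogue(text: str) -> list[tuple[str, str]]:
--     # pass 1: parse each block into a (speaker, stripped message) pair, skipping others
--     parsed = []
--     for line in text.split("\n\n"):
--         if line.startswith("Human:"):
--             parsed.append(("Human", line[7:].strip()))
--         elif line.startswith("Assistant:"):
--             parsed.append(("Assistant", line[11:].strip()))
--     # pass 2: group maximal runs of the same speaker with an index scan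
--     out = []
--     i = 0
--     n = len(parsed)
--     while i < n:
--         j = i
--         while j < n and parsed[j][0] == parsed[i][0]:
--             j += 1
--         out.append((parsed[i][0], "\n".join(m for _, m in parsed[i:j])))
--         i = j
--     return out
-- ===== Notes on version B (the rewrite author's own statement) =====
-- stated objective: idiomatic
-- what changed: Replaces A's single interleaved loop with mutable role/messages bookkeeping and a final flush by two clean passes: a parse pass producing (speaker, stripped message) pairs, then a run-grouping pass over that list.
import Mathlib
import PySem

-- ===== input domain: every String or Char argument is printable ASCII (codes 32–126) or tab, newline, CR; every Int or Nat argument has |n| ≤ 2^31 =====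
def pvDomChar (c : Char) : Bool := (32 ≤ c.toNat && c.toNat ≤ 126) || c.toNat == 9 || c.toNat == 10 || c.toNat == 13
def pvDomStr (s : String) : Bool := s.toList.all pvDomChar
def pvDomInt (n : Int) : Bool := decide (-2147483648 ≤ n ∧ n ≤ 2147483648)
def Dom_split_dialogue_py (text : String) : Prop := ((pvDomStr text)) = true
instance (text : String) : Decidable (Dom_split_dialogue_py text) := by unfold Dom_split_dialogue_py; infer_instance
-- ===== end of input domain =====

-- B re-implements A's interleaved loop as a parse pass followed by a run-grouping pass (idiomatic; same cost).

-- ===== PORT A =====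
-- shared body of A's two taken branches: the role-change bookkeeping plus messages.append(message.strip())
def pvCombine (st : List (String × String) × Option String × List String)
    (speaker message : String) : List (String × String) × Option String × List String :=
  match st with
  | (dialogue, role, messages) =>
    if role = some speaker then
      (dialogue, role, messages ++ [PySem.Str.strip message])
    else
      match role with
      | none => (dialogue, some speaker, messages ++ [PySem.Str.strip message])
      | some r => (dialogue ++ [(r, PySem.Str.join "\n" messages)], some speaker,
                   [PySem.Str.strip message])

def pvStepA (st : List (String × String) × Option String × List String) (line : String) :
    List (String × String) × Option String × List String :=
  if PySem.Str.startswith line "Human:" then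
    pvCombine st "Human" (PySem.Str.slice line (some 7) none)
  else if PySem.Str.startswith line "Assistant:" then
    pvCombine st "Assistant" (PySem.Str.slice line (some 11) none)
  else st

def split_dialogue_py (text : String) : List (String × String) :=
  let lines := (PySem.Str.split? text "\n\n").getD []
  match lines.foldl pvStepA ([], none, []) with
  | (dialogue, some r, messages) =>
      if messages.length > 0 then dialogue ++ [(r, PySem.Str.join "\n" messages)] else dialogue
  | (dialogue, none, _) => dialogue

-- ===== PORT B =====
-- pass 1: parse one block
def pvParse (line : String) : Option (String × String) :=
  if PySem.Str.startswith line "Human:" then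
    some ("Human", PySem.Str.strip (PySem.Str.slice line (some 7) none))
  else if PySem.Str.startswith line "Assistant:" then
    some ("Assistant", PySem.Str.strip (PySem.Str.slice line (some 11) none))
  else none

-- pass 2: group a maximal run of the same speaker (the inner while-j scan), recurse on the rest
def pvGroup : List (String × String) → List (String × String)
  | [] => []
  | (s, m) :: rest =>
      let run := rest.takeWhile (fun p => p.1 == s)
      (s, PySem.Str.join "\n" (m :: run.map Prod.snd)) :: pvGroup (rest.dropWhile (fun p => p.1 == s))
termination_by l => l.length
decreasing_by
  have := List.length_dropWhile_le (fun p => p.1 == s) rest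
  simp; omega

def split_dialogue_py_alt (text : String) : List (String × String) :=
  pvGroup (((PySem.Str.split? text "\n\n").getD []).filterMap pvParse)

-- ===== PRECONDITION & SPEC =====
def Spec_split_dialogue_py (text : String) (out : List (String × String)) : Prop := out = split_dialogue_py_alt text
instance (text : String) (out : List (String × String)) : Decidable (Spec_split_dialogue_py text out) := by unfold Spec_split_dialogue_py; infer_instance

-- ===== CLAIM (what is proved, stated in full; the proofs are below) =====
def Claim_equal_split_dialogue_py : Prop := ∀ (text : String), Dom_split_dialogue_py text → Spec_split_dialogue_py text (split_dialogue_py text)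

-- ===== LEMMAS AND PROOFS =====

-- A's step on an already-parsed pair (the grouping part only)
def pvStep2 (st : List (String × String) × Option String × List String) (p : String × String) :
    List (String × String) × Option String × List String :=
  match st, p with
  | (dialogue, role, messages), (speaker, message) =>
    if role = some speaker then
      (dialogue, role, messages ++ [message])
    else
      match role with
      | none => (dialogue, some speaker, messages ++ [message])
      | some r => (dialogue ++ [(r, PySem.Str.join "\n" messages)], some speaker, [message])

theorem pvStepA_eq_parse (st : List (String × String) × Option String × List String)
    (line : String) :
    pvStepA st line = match pvParse line with
      | none => st
      | some p => pvStep2 st p := by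
  obtain ⟨d, role, ms⟩ := st
  unfold pvStepA pvParse pvCombine pvStep2
  split_ifs <;> rfl

theorem foldl_stepA_eq (lines : List String)
    (st : List (String × String) × Option String × List String) :
    lines.foldl pvStepA st = (lines.filterMap pvParse).foldl pvStep2 st := by
  induction lines generalizing st with
  | nil => rfl
  | cons l rest ih =>
      rw [List.foldl_cons, List.filterMap_cons, pvStepA_eq_parse]
      cases pvParse l with
      | none => exact ih st
      | some p => simp [List.foldl_cons, ih]

-- flush of A's final state
def pvFlush (st : List (String × String) × Option String × List String) :
    List (String × String) :=
  match st with
  | (dialogue, some r, messages) =>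
      if messages.length > 0 then dialogue ++ [(r, PySem.Str.join "\n" messages)] else dialogue
  | (dialogue, none, _) => dialogue

-- main invariant: running A's grouping step over p from a pending run (r, ms) and flushing
theorem pvRun (p : List (String × String)) (d : List (String × String)) (r : String)
    (ms : List String) (hms : ms ≠ []) :
    pvFlush (p.foldl pvStep2 (d, some r, ms)) =
      d ++ (r, PySem.Str.join "\n" (ms ++ (p.takeWhile (fun q => q.1 == r)).map Prod.snd)) ::
        pvGroup (p.dropWhile (fun q => q.1 == r)) := by
  induction p generalizing d r ms with
  | nil =>
      simp [pvFlush, List.length_pos_iff, hms, pvGroup]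
  | cons q rest ih =>
      obtain ⟨s, m⟩ := q
      by_cases hsr : s = r
      · subst hsr
        have hstep : pvStep2 (d, some s, ms) (s, m) = (d, some s, ms ++ [m]) := by
          simp [pvStep2]
        rw [List.foldl_cons, hstep, ih d s (ms ++ [m]) (by simp)]
        simp [List.dropWhile_cons]
      · have hstep : pvStep2 (d, some r, ms) (s, m) =
            (d ++ [(r, PySem.Str.join "\n" ms)], some s, [m]) := by
          simp [pvStep2, Ne.symm hsr]
        rw [List.foldl_cons, hstep, ih _ s [m] (by simp)]
        have hbne : ((s, m).1 == r) = false := by simp [hsr]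
        rw [List.takeWhile_cons, List.dropWhile_cons]
        simp only [hbne]
        simp [pvGroup]

theorem pvGrouping (p : List (String × String)) :
    pvFlush (p.foldl pvStep2 ([], none, [])) = pvGroup p := by
  cases p with
  | nil => simp [pvFlush, pvGroup]
  | cons q rest =>
      obtain ⟨s, m⟩ := q
      have hstep : pvStep2 ([], none, []) (s, m) = ([], some s, [m]) := by
        simp [pvStep2]
      rw [List.foldl_cons, hstep, pvRun rest [] s [m] (by simp)]
      simp [pvGroup]

-- ===== VERDICT (by name: the statement is the Claim_ definition above) =====
theorem split_dialogue_py_spec : Claim_equal_split_dialogue_py := by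
  intro text _
  show pvFlush (List.foldl pvStepA ([], none, []) ((PySem.Str.split? text "\n\n").getD [])) =
    split_dialogue_py_alt text
  rw [foldl_stepA_eq]
  exact pvGrouping _
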